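-- pv_equiv track=rewrite | github.com/yixuantt/GAPrune | gaprune/features/gradient.py | parse_sparsify_layers
-- ===== SOURCE A (Python) =====
-- def get_layer_type_patterns():
--     return {
--         'mlp': ['gate_proj', 'up_proj', 'down_proj'],
--         'attention': ['q_proj', 'k_proj', 'v_proj', 'o_proj'],
--         'layernorm': ['input_layernorm', 'post_attention_layernorm', 'q_norm', 'k_norm'],
--         'embed': ['embed_tokens'],
--         'final_norm': ['norm.weight'],
--         'mlp_gate': ['gate_proj'],
--         'mlp_up': ['up_proj'],
--         'mlp_down': ['down_proj'],
--         'attn_q': ['q_proj'],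
--         'attn_k': ['k_proj'],
--         'attn_v': ['v_proj'],
--         'attn_o': ['o_proj'],
--         'norm_input': ['input_layernorm'],
--         'norm_post_attn': ['post_attention_layernorm'],
--         'norm_qk': ['q_norm', 'k_norm'],
--     }
--
-- def parse_sparsify_layers(sparsify_layers):
--     layer_patterns = get_layer_type_patterns()
--     patterns_to_sparsify = set()
--     for layer_type in sparsify_layers or []:
--         if layer_type == 'all':
--             for key, patterns in layer_patterns.items():
--                 if key != 'final_norm':
--                     patterns_to_sparsify.update(patterns)
--         elif layer_type == 'linear':
--             patterns_to_sparsify.update(layer_patterns['mlp'])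
--             patterns_to_sparsify.update(layer_patterns['attention'])
--         elif layer_type in layer_patterns:
--             patterns_to_sparsify.update(layer_patterns[layer_type])
--         else:
--             pass
--     return patterns_to_sparsify
-- ===== SOURCE B (Python) =====
-- def get_layer_type_patterns():
--     return {
--         'mlp': ['gate_proj', 'up_proj', 'down_proj'],
--         'attention': ['q_proj', 'k_proj', 'v_proj', 'o_proj'],
--         'layernorm': ['input_layernorm', 'post_attention_layernorm', 'q_norm', 'k_norm'],
--         'embed': ['embed_tokens'],
--         'final_norm': ['norm.weight'],
--         'mlp_gate': ['gate_proj'],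
--         'mlp_up': ['up_proj'],
--         'mlp_down': ['down_proj'],
--         'attn_q': ['q_proj'],
--         'attn_k': ['k_proj'],
--         'attn_v': ['v_proj'],
--         'attn_o': ['o_proj'],
--         'norm_input': ['input_layernorm'],
--         'norm_post_attn': ['post_attention_layernorm'],
--         'norm_qk': ['q_norm', 'k_norm'],
--     }
--
-- # Bitmask encoding: the 13 distinct patterns, and one integer bitmask per layer
-- # type (bit i set iff _UNIVERSE[i] belongs to that type's patterns; 'all' is the
-- # union of everything but final_norm, 'linear' is mlp|attention). Built once.
-- _UNIVERSE = ['gate_proj', 'up_proj', 'down_proj',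
--              'q_proj', 'k_proj', 'v_proj', 'o_proj',
--              'input_layernorm', 'post_attention_layernorm', 'q_norm', 'k_norm',
--              'embed_tokens', 'norm.weight']
-- _IDX = {u: i for i, u in enumerate(_UNIVERSE)}
-- _MASKS = {k: sum(1 << _IDX[p] for p in ps) for k, ps in get_layer_type_patterns().items()}
-- _MASKS['all'] = 0
-- for k, ps in get_layer_type_patterns().items():
--     if k != 'final_norm':
--         for p in ps:
--             _MASKS['all'] |= 1 << _IDX[p]
-- _MASKS['linear'] = _MASKS['mlp'] | _MASKS['attention']
--
-- def parse_sparsify_layers(sparsify_layers):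
--     seen = 0
--     order = []
--     for lt in (sparsify_layers or []):
--         mask = _MASKS.get(lt, 0)
--         for i, u in enumerate(_UNIVERSE):
--             if (mask >> i) % 2 == 1 and (seen >> i) % 2 == 0:
--                 order.append(u)
--                 seen += 1 << i
--     return set(order)
-- ===== Notes on version B (the rewrite author's own statement) =====
-- stated objective: alternative
-- what changed: Replaces A's if/elif cascade unioning string lists into a set by a bitmask algorithm: each layer type maps to an integer bitmask over a fixed 13-pattern universe, an integer 'seen' accumulator replaces the string set, and new patterns are emitted by scanning the universe bits.
import Mathlib
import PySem

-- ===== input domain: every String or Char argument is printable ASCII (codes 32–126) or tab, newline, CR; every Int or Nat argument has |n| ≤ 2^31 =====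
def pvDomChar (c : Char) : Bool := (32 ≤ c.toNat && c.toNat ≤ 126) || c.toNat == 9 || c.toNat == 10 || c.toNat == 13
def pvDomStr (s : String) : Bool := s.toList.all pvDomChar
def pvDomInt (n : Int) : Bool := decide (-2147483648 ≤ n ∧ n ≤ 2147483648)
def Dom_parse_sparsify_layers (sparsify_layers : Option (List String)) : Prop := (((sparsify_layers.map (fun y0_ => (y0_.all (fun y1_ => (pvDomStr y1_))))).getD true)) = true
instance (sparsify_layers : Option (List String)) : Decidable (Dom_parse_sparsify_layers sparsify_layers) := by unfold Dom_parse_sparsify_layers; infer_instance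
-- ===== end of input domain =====

-- B replaces A's string-set union over an if/elif cascade by a bitmask algorithm over a fixed
-- 13-pattern universe: per layer type an integer mask is looked up and the new bits are emitted
-- in universe order while an integer 'seen' accumulator replaces the set (objective: alternative).


-- ===== PORT A =====
-- get_layer_type_patterns()
def pvLayerPatterns : PySem.Dict String (List String) := PySem.Dict.mk [
  ("mlp", ["gate_proj", "up_proj", "down_proj"]),
  ("attention", ["q_proj", "k_proj", "v_proj", "o_proj"]),
  ("layernorm", ["input_layernorm", "post_attention_layernorm", "q_norm", "k_norm"]),
  ("embed", ["embed_tokens"]),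
  ("final_norm", ["norm.weight"]),
  ("mlp_gate", ["gate_proj"]),
  ("mlp_up", ["up_proj"]),
  ("mlp_down", ["down_proj"]),
  ("attn_q", ["q_proj"]),
  ("attn_k", ["k_proj"]),
  ("attn_v", ["v_proj"]),
  ("attn_o", ["o_proj"]),
  ("norm_input", ["input_layernorm"]),
  ("norm_post_attn", ["post_attention_layernorm"]),
  ("norm_qk", ["q_norm", "k_norm"])]

def parse_sparsify_layers (sparsify_layers : Option (List String)) : List String :=
  let layer_patterns := pvLayerPatterns
  -- 'for layer_type in sparsify_layers or []' with the if/elif/else cascade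
  (sparsify_layers.getD []).foldl
    (fun patterns_to_sparsify layer_type =>
      if layer_type == "all" then
        layer_patterns.items.foldl
          (fun acc kp =>
            if kp.1 != "final_norm" then PySem.Set.update acc kp.2 else acc)
          patterns_to_sparsify
      else if layer_type == "linear" then
        PySem.Set.update
          (PySem.Set.update patterns_to_sparsify (layer_patterns.getD "mlp" []))
          (layer_patterns.getD "attention" [])
      else if layer_patterns.contains layer_type then
        PySem.Set.update patterns_to_sparsify (layer_patterns.getD layer_type [])
      else
        patterns_to_sparsify)
    PySem.Set.empty

-- ===== PORT B =====
-- _UNIVERSE of Source B: the 13 distinct patterns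
def pvUniverse : List String :=
  ["gate_proj", "up_proj", "down_proj",
   "q_proj", "k_proj", "v_proj", "o_proj",
   "input_layernorm", "post_attention_layernorm", "q_norm", "k_norm",
   "embed_tokens", "norm.weight"]

-- _MASKS of Source B (one bitmask per layer type over pvUniverse; built once at module
-- load in Source B, written out here as the literal dict it evaluates to)
def pvMasks : PySem.Dict String Nat := PySem.Dict.mk [
  ("mlp", 7), ("attention", 120), ("layernorm", 1920), ("embed", 2048),
  ("final_norm", 4096), ("mlp_gate", 1), ("mlp_up", 2), ("mlp_down", 4),
  ("attn_q", 8), ("attn_k", 16), ("attn_v", 32), ("attn_o", 64),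
  ("norm_input", 128), ("norm_post_attn", 256), ("norm_qk", 1536),
  ("all", 4095), ("linear", 127)]

-- the inner 'for i, u in enumerate(_UNIVERSE): …' body of Source B
def pvBitStep (mask : Nat) (s : Nat × List String) (iu : Int × String) : Nat × List String :=
  if (mask >>> iu.1.toNat) % 2 == 1 && (s.1 >>> iu.1.toNat) % 2 == 0 then
    (s.1 + (1 <<< iu.1.toNat), s.2 ++ [iu.2])
  else s

def parse_sparsify_layers_alt (sparsify_layers : Option (List String)) : List String :=
  let r := (sparsify_layers.getD []).foldl
    (fun s lt =>
      let mask := pvMasks.getD lt 0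
      (PySem.List.enumerate pvUniverse 0).foldl (pvBitStep mask) s)
    ((0 : Nat), ([] : List String))
  PySem.Set.ofList r.2

-- ===== PRECONDITION & SPEC =====
def Spec_parse_sparsify_layers (sparsify_layers : Option (List String)) (out : List String) : Prop := out = parse_sparsify_layers_alt sparsify_layers
instance (sparsify_layers : Option (List String)) (out : List String) : Decidable (Spec_parse_sparsify_layers sparsify_layers out) := by unfold Spec_parse_sparsify_layers; infer_instance

-- ===== CLAIM (what is proved, stated in full; the proofs are below) =====
def Claim_equal_parse_sparsify_layers : Prop := ∀ (sparsify_layers : Option (List String)), Dom_parse_sparsify_layers sparsify_layers → Spec_parse_sparsify_layers sparsify_layers (parse_sparsify_layers sparsify_layers)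

-- ===== LEMMAS AND PROOFS =====

-- proof-side table: the flat pattern list A's cascade unions in for each layer type
def pvExtended : PySem.Dict String (List String) := PySem.Dict.mk [
  ("mlp", ["gate_proj", "up_proj", "down_proj"]),
  ("attention", ["q_proj", "k_proj", "v_proj", "o_proj"]),
  ("layernorm", ["input_layernorm", "post_attention_layernorm", "q_norm", "k_norm"]),
  ("embed", ["embed_tokens"]),
  ("final_norm", ["norm.weight"]),
  ("mlp_gate", ["gate_proj"]),
  ("mlp_up", ["up_proj"]),
  ("mlp_down", ["down_proj"]),
  ("attn_q", ["q_proj"]),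
  ("attn_k", ["k_proj"]),
  ("attn_v", ["v_proj"]),
  ("attn_o", ["o_proj"]),
  ("norm_input", ["input_layernorm"]),
  ("norm_post_attn", ["post_attention_layernorm"]),
  ("norm_qk", ["q_norm", "k_norm"]),
  ("all", ["gate_proj", "up_proj", "down_proj", "q_proj", "k_proj", "v_proj", "o_proj",
           "input_layernorm", "post_attention_layernorm", "q_norm", "k_norm", "embed_tokens"]),
  ("linear", ["gate_proj", "up_proj", "down_proj", "q_proj", "k_proj", "v_proj", "o_proj"])]

-- proof-side: the integer 'seen' of B encodes exactly the set of universe patterns collected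
def pvEnc (o : List String) : Nat :=
     (if "gate_proj" ∈ o then 1 else 0)
   + 2 * (if "up_proj" ∈ o then 1 else 0)
   + 4 * (if "down_proj" ∈ o then 1 else 0)
   + 8 * (if "q_proj" ∈ o then 1 else 0)
   + 16 * (if "k_proj" ∈ o then 1 else 0)
   + 32 * (if "v_proj" ∈ o then 1 else 0)
   + 64 * (if "o_proj" ∈ o then 1 else 0)
   + 128 * (if "input_layernorm" ∈ o then 1 else 0)
   + 256 * (if "post_attention_layernorm" ∈ o then 1 else 0)
   + 512 * (if "q_norm" ∈ o then 1 else 0)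
   + 1024 * (if "k_norm" ∈ o then 1 else 0)
   + 2048 * (if "embed_tokens" ∈ o then 1 else 0)
   + 4096 * (if "norm.weight" ∈ o then 1 else 0)

theorem pv_enc_bit1 (o : List String) (k : Nat) (u : String)
    (hu : pvUniverse[k]? = some u) (hm : u ∈ o) :
    (pvEnc o >>> k) % 2 = 1 := by
  have hk : k < 13 := by
    by_contra h
    rw [List.getElem?_eq_none (by simp [pvUniverse]; omega)] at hu
    simp at hu
  have h0 : (if "gate_proj" ∈ o then (1:Nat) else 0) ≤ 1 := by split <;> simp
  have h1 : (if "up_proj" ∈ o then (1:Nat) else 0) ≤ 1 := by split <;> simp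
  have h2 : (if "down_proj" ∈ o then (1:Nat) else 0) ≤ 1 := by split <;> simp
  have h3 : (if "q_proj" ∈ o then (1:Nat) else 0) ≤ 1 := by split <;> simp
  have h4 : (if "k_proj" ∈ o then (1:Nat) else 0) ≤ 1 := by split <;> simp
  have h5 : (if "v_proj" ∈ o then (1:Nat) else 0) ≤ 1 := by split <;> simp
  have h6 : (if "o_proj" ∈ o then (1:Nat) else 0) ≤ 1 := by split <;> simp
  have h7 : (if "input_layernorm" ∈ o then (1:Nat) else 0) ≤ 1 := by split <;> simp
  have h8 : (if "post_attention_layernorm" ∈ o then (1:Nat) else 0) ≤ 1 := by split <;> simp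
  have h9 : (if "q_norm" ∈ o then (1:Nat) else 0) ≤ 1 := by split <;> simp
  have h10 : (if "k_norm" ∈ o then (1:Nat) else 0) ≤ 1 := by split <;> simp
  have h11 : (if "embed_tokens" ∈ o then (1:Nat) else 0) ≤ 1 := by split <;> simp
  have h12 : (if "norm.weight" ∈ o then (1:Nat) else 0) ≤ 1 := by split <;> simp
  interval_cases k <;>
    (simp only [pvUniverse, List.getElem?_cons_zero, List.getElem?_cons_succ,
       Option.some.injEq] at hu
     subst hu
     simp only [pvEnc, hm, if_true, Nat.shiftRight_eq_div_pow]
     omega)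

theorem pv_enc_bit0 (o : List String) (k : Nat) (u : String)
    (hu : pvUniverse[k]? = some u) (hm : u ∉ o) :
    (pvEnc o >>> k) % 2 = 0 := by
  have hk : k < 13 := by
    by_contra h
    rw [List.getElem?_eq_none (by simp [pvUniverse]; omega)] at hu
    simp at hu
  have h0 : (if "gate_proj" ∈ o then (1:Nat) else 0) ≤ 1 := by split <;> simp
  have h1 : (if "up_proj" ∈ o then (1:Nat) else 0) ≤ 1 := by split <;> simp
  have h2 : (if "down_proj" ∈ o then (1:Nat) else 0) ≤ 1 := by split <;> simp
  have h3 : (if "q_proj" ∈ o then (1:Nat) else 0) ≤ 1 := by split <;> simp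
  have h4 : (if "k_proj" ∈ o then (1:Nat) else 0) ≤ 1 := by split <;> simp
  have h5 : (if "v_proj" ∈ o then (1:Nat) else 0) ≤ 1 := by split <;> simp
  have h6 : (if "o_proj" ∈ o then (1:Nat) else 0) ≤ 1 := by split <;> simp
  have h7 : (if "input_layernorm" ∈ o then (1:Nat) else 0) ≤ 1 := by split <;> simp
  have h8 : (if "post_attention_layernorm" ∈ o then (1:Nat) else 0) ≤ 1 := by split <;> simp
  have h9 : (if "q_norm" ∈ o then (1:Nat) else 0) ≤ 1 := by split <;> simp
  have h10 : (if "k_norm" ∈ o then (1:Nat) else 0) ≤ 1 := by split <;> simp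
  have h11 : (if "embed_tokens" ∈ o then (1:Nat) else 0) ≤ 1 := by split <;> simp
  have h12 : (if "norm.weight" ∈ o then (1:Nat) else 0) ≤ 1 := by split <;> simp
  interval_cases k <;>
    (simp only [pvUniverse, List.getElem?_cons_zero, List.getElem?_cons_succ,
       Option.some.injEq] at hu
     subst hu
     simp only [pvEnc, hm, if_false, Nat.shiftRight_eq_div_pow]
     omega)

theorem pv_enc_append (o : List String) (k : Nat) (u : String)
    (hu : pvUniverse[k]? = some u) (hno : u ∉ o) :
    pvEnc (o ++ [u]) = pvEnc o + (1 <<< k) := by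
  have hk : k < 13 := by
    by_contra h
    rw [List.getElem?_eq_none (by simp [pvUniverse]; omega)] at hu
    simp at hu
  interval_cases k <;>
    (simp only [pvUniverse, List.getElem?_cons_zero, List.getElem?_cons_succ,
       Option.some.injEq] at hu
     subst hu
     simp [pvEnc, hno]
     try ring)


def pvSel (mask : Nat) (P : List (Int × String)) : List String :=
  P.filterMap (fun p => if (mask >>> p.1.toNat) % 2 = 1 then some p.2 else none)

theorem pv_inner_general (mask : Nat) (P : List (Int × String)) (o : List String)
    (hP : ∀ p ∈ P, ∃ k : Nat, p.1 = (k : Int) ∧ pvUniverse[k]? = some p.2) :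
    P.foldl (pvBitStep mask) (pvEnc o, o)
    = (pvEnc (PySem.Set.update o (pvSel mask P)), PySem.Set.update o (pvSel mask P)) := by
  induction P generalizing o with
  | nil => simp [pvSel, PySem.Set.update]
  | cons p rest ih =>
    obtain ⟨k, hp1, hu⟩ := hP p (List.mem_cons_self)
    have hrest : ∀ q ∈ rest, ∃ k : Nat, q.1 = (k : Int) ∧ pvUniverse[k]? = some q.2 :=
      fun q hq => hP q (List.mem_cons_of_mem _ hq)
    have htn : p.1.toNat = k := by rw [hp1]; simp
    by_cases hmask : (mask >>> k) % 2 = 1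
    · have hsel : pvSel mask (p :: rest) = p.2 :: pvSel mask rest := by
        simp [pvSel, htn, hmask]
      by_cases hmem : p.2 ∈ o
      · have hb := pv_enc_bit1 o k p.2 hu hmem
        have hstep : pvBitStep mask (pvEnc o, o) p = (pvEnc o, o) := by
          simp [pvBitStep, htn, hb]
        have hadd : PySem.Set.add o p.2 = o := by
          simp [PySem.Set.add, PySem.Set.contains, hmem]
        rw [List.foldl_cons, hstep, ih o hrest, hsel, PySem.Set.update_cons, hadd]
      · have hb := pv_enc_bit0 o k p.2 hu hmem
        have hstep : pvBitStep mask (pvEnc o, o) p = (pvEnc (o ++ [p.2]), o ++ [p.2]) := by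
          simp [pvBitStep, htn, hb, hmask, pv_enc_append o k p.2 hu hmem]
        have hadd : PySem.Set.add o p.2 = o ++ [p.2] := by
          simp [PySem.Set.add, PySem.Set.contains, hmem]
        rw [List.foldl_cons, hstep, ih (o ++ [p.2]) hrest, hsel, PySem.Set.update_cons, hadd]
    · have hsel : pvSel mask (p :: rest) = pvSel mask rest := by
        simp [pvSel, htn, hmask]
      have hstep : pvBitStep mask (pvEnc o, o) p = (pvEnc o, o) := by
        simp [pvBitStep, htn, hmask]
      rw [List.foldl_cons, hstep, ih o hrest, hsel]

theorem pv_sel_eq (lt : String) :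
    pvSel (pvMasks.getD lt 0) (PySem.List.enumerate pvUniverse 0) = pvExtended.getD lt [] := by
  by_cases e1 : lt = "mlp"; · subst e1; decide
  by_cases e2 : lt = "attention"; · subst e2; decide
  by_cases e3 : lt = "layernorm"; · subst e3; decide
  by_cases e4 : lt = "embed"; · subst e4; decide
  by_cases e5 : lt = "final_norm"; · subst e5; decide
  by_cases e6 : lt = "mlp_gate"; · subst e6; decide
  by_cases e7 : lt = "mlp_up"; · subst e7; decide
  by_cases e8 : lt = "mlp_down"; · subst e8; decide
  by_cases e9 : lt = "attn_q"; · subst e9; decide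
  by_cases e10 : lt = "attn_k"; · subst e10; decide
  by_cases e11 : lt = "attn_v"; · subst e11; decide
  by_cases e12 : lt = "attn_o"; · subst e12; decide
  by_cases e13 : lt = "norm_input"; · subst e13; decide
  by_cases e14 : lt = "norm_post_attn"; · subst e14; decide
  by_cases e15 : lt = "norm_qk"; · subst e15; decide
  by_cases e16 : lt = "all"; · subst e16; decide
  by_cases e17 : lt = "linear"; · subst e17; decide
  have d1 : ("mlp" == lt) = false := by simp; exact fun h => e1 h.symm
  have d2 : ("attention" == lt) = false := by simp; exact fun h => e2 h.symm
  have d3 : ("layernorm" == lt) = false := by simp; exact fun h => e3 h.symm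
  have d4 : ("embed" == lt) = false := by simp; exact fun h => e4 h.symm
  have d5 : ("final_norm" == lt) = false := by simp; exact fun h => e5 h.symm
  have d6 : ("mlp_gate" == lt) = false := by simp; exact fun h => e6 h.symm
  have d7 : ("mlp_up" == lt) = false := by simp; exact fun h => e7 h.symm
  have d8 : ("mlp_down" == lt) = false := by simp; exact fun h => e8 h.symm
  have d9 : ("attn_q" == lt) = false := by simp; exact fun h => e9 h.symm
  have d10 : ("attn_k" == lt) = false := by simp; exact fun h => e10 h.symm
  have d11 : ("attn_v" == lt) = false := by simp; exact fun h => e11 h.symm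
  have d12 : ("attn_o" == lt) = false := by simp; exact fun h => e12 h.symm
  have d13 : ("norm_input" == lt) = false := by simp; exact fun h => e13 h.symm
  have d14 : ("norm_post_attn" == lt) = false := by simp; exact fun h => e14 h.symm
  have d15 : ("norm_qk" == lt) = false := by simp; exact fun h => e15 h.symm
  have d16 : ("all" == lt) = false := by simp; exact fun h => e16 h.symm
  have d17 : ("linear" == lt) = false := by simp; exact fun h => e17 h.symm
  have hm : pvMasks.getD lt 0 = 0 := by
    simp [pvMasks, PySem.Dict.getD, PySem.Dict.get?, List.find?,
      d1, d2, d3, d4, d5, d6, d7, d8, d9, d10, d11, d12, d13, d14, d15, d16, d17]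
  have he : pvExtended.getD lt [] = ([] : List String) := by
    simp [pvExtended, PySem.Dict.getD, PySem.Dict.get?, List.find?,
      d1, d2, d3, d4, d5, d6, d7, d8, d9, d10, d11, d12, d13, d14, d15, d16, d17]
  rw [hm, he]
  simp [pvSel, Nat.zero_shiftRight]

-- One iteration of A's cascade adds exactly the pvExtended entry for that layer type.
theorem pv_step_eq (acc : PySem.Set String) (lt : String) :
    (if lt == "all" then
        pvLayerPatterns.items.foldl
          (fun acc kp =>
            if kp.1 != "final_norm" then PySem.Set.update acc kp.2 else acc)
          acc
      else if lt == "linear" then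
        PySem.Set.update (PySem.Set.update acc (pvLayerPatterns.getD "mlp" []))
          (pvLayerPatterns.getD "attention" [])
      else if pvLayerPatterns.contains lt then
        PySem.Set.update acc (pvLayerPatterns.getD lt [])
      else acc)
    = PySem.Set.update acc (pvExtended.getD lt []) := by
  by_cases h1 : lt = "all"
  · subst h1
    simp [pvLayerPatterns, pvExtended, PySem.Dict.getD, PySem.Dict.get?,
      PySem.Set.update, List.foldl]
  · by_cases h2 : lt = "linear"
    · subst h2
      simp [pvLayerPatterns, pvExtended, PySem.Dict.getD, PySem.Dict.get?,
        PySem.Set.update, List.foldl]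
    · simp only [beq_iff_eq, h1, h2, if_false]
      simp [pvLayerPatterns, pvExtended, PySem.Dict.contains, PySem.Dict.getD,
        PySem.Dict.get?]
      split_ifs with hc
      · rcases hc with rfl|rfl|rfl|rfl|rfl|rfl|rfl|rfl|rfl|rfl|rfl|rfl|rfl|rfl|rfl <;> simp
      · have h1' : ¬"all" = lt := fun h => h1 h.symm
        have h2' : ¬"linear" = lt := fun h => h2 h.symm
        push Not at hc
        obtain ⟨c1, c2, c3, c4, c5, c6, c7, c8, c9, c10, c11, c12, c13, c14, c15⟩ := hc
        have d1 : ("mlp" == lt) = false := by simp [c1]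
        have d2 : ("attention" == lt) = false := by simp [c2]
        have d3 : ("layernorm" == lt) = false := by simp [c3]
        have d4 : ("embed" == lt) = false := by simp [c4]
        have d5 : ("final_norm" == lt) = false := by simp [c5]
        have d6 : ("mlp_gate" == lt) = false := by simp [c6]
        have d7 : ("mlp_up" == lt) = false := by simp [c7]
        have d8 : ("mlp_down" == lt) = false := by simp [c8]
        have d9 : ("attn_q" == lt) = false := by simp [c9]
        have d10 : ("attn_k" == lt) = false := by simp [c10]
        have d11 : ("attn_v" == lt) = false := by simp [c11]
        have d12 : ("attn_o" == lt) = false := by simp [c12]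
        have d13 : ("norm_input" == lt) = false := by simp [c13]
        have d14 : ("norm_post_attn" == lt) = false := by simp [c14]
        have d15 : ("norm_qk" == lt) = false := by simp [c15]
        have dall : ("all" == lt) = false := by simp [h1']
        have dlin : ("linear" == lt) = false := by simp [h2']
        simp [List.find?, d1, d2, d3, d4, d5, d6, d7, d8, d9, d10, d11, d12, d13, d14, d15,
          dall, dlin, PySem.Set.update]

theorem pv_henum : ∀ p ∈ PySem.List.enumerate pvUniverse 0,
    ∃ k : Nat, p.1 = (k : Int) ∧ pvUniverse[k]? = some p.2 := by
  have he : PySem.List.enumerate pvUniverse 0 =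
      [((0:Int),"gate_proj"), (1,"up_proj"), (2,"down_proj"), (3,"q_proj"), (4,"k_proj"),
       (5,"v_proj"), (6,"o_proj"), (7,"input_layernorm"), (8,"post_attention_layernorm"),
       (9,"q_norm"), (10,"k_norm"), (11,"embed_tokens"), (12,"norm.weight")] := by decide
  rw [he]
  intro p hp
  fin_cases hp
  · exact ⟨0, by norm_num, rfl⟩
  · exact ⟨1, by norm_num, rfl⟩
  · exact ⟨2, by norm_num, rfl⟩
  · exact ⟨3, by norm_num, rfl⟩
  · exact ⟨4, by norm_num, rfl⟩
  · exact ⟨5, by norm_num, rfl⟩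
  · exact ⟨6, by norm_num, rfl⟩
  · exact ⟨7, by norm_num, rfl⟩
  · exact ⟨8, by norm_num, rfl⟩
  · exact ⟨9, by norm_num, rfl⟩
  · exact ⟨10, by norm_num, rfl⟩
  · exact ⟨11, by norm_num, rfl⟩
  · exact ⟨12, by norm_num, rfl⟩

theorem pv_outer (xs : List String) (o : List String) :
    xs.foldl
      (fun s lt =>
        let mask := pvMasks.getD lt 0
        (PySem.List.enumerate pvUniverse 0).foldl (pvBitStep mask) s)
      (pvEnc o, o)
    = (pvEnc (xs.foldl
        (fun patterns_to_sparsify layer_type =>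
          if layer_type == "all" then
            pvLayerPatterns.items.foldl
              (fun acc kp =>
                if kp.1 != "final_norm" then PySem.Set.update acc kp.2 else acc)
              patterns_to_sparsify
          else if layer_type == "linear" then
            PySem.Set.update
              (PySem.Set.update patterns_to_sparsify (pvLayerPatterns.getD "mlp" []))
              (pvLayerPatterns.getD "attention" [])
          else if pvLayerPatterns.contains layer_type then
            PySem.Set.update patterns_to_sparsify (pvLayerPatterns.getD layer_type [])
          else patterns_to_sparsify)
        o),
       xs.foldl
        (fun patterns_to_sparsify layer_type =>
          if layer_type == "all" then
            pvLayerPatterns.items.foldl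
              (fun acc kp =>
                if kp.1 != "final_norm" then PySem.Set.update acc kp.2 else acc)
              patterns_to_sparsify
          else if layer_type == "linear" then
            PySem.Set.update
              (PySem.Set.update patterns_to_sparsify (pvLayerPatterns.getD "mlp" []))
              (pvLayerPatterns.getD "attention" [])
          else if pvLayerPatterns.contains layer_type then
            PySem.Set.update patterns_to_sparsify (pvLayerPatterns.getD layer_type [])
          else patterns_to_sparsify)
        o) := by
  induction xs generalizing o with
  | nil => simp
  | cons x xs ih =>
    rw [List.foldl_cons, List.foldl_cons]
    have henum := pv_henum
    have hinner := pv_inner_general (pvMasks.getD x 0) (PySem.List.enumerate pvUniverse 0) o henum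
    rw [pv_sel_eq x] at hinner
    simp only [hinner, pv_step_eq o x]
    exact ih (PySem.Set.update o (pvExtended.getD x []))

theorem pv_nodup (xs : List String) (o : List String) (ho : o.Nodup) :
    (xs.foldl
      (fun patterns_to_sparsify layer_type =>
        if layer_type == "all" then
          pvLayerPatterns.items.foldl
            (fun acc kp =>
              if kp.1 != "final_norm" then PySem.Set.update acc kp.2 else acc)
            patterns_to_sparsify
        else if layer_type == "linear" then
          PySem.Set.update
            (PySem.Set.update patterns_to_sparsify (pvLayerPatterns.getD "mlp" []))
            (pvLayerPatterns.getD "attention" [])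
        else if pvLayerPatterns.contains layer_type then
          PySem.Set.update patterns_to_sparsify (pvLayerPatterns.getD layer_type [])
        else patterns_to_sparsify)
      o).Nodup := by
  induction xs generalizing o with
  | nil => exact ho
  | cons x xs ih =>
    rw [List.foldl_cons]
    rw [pv_step_eq o x]
    exact ih _ (PySem.Set.nodup_update _ _ ho)

-- ===== VERDICT (by name: the statement is the Claim_ definition above) =====
theorem parse_sparsify_layers_spec : Claim_equal_parse_sparsify_layers := by
  intro sl _
  unfold Spec_parse_sparsify_layers
  have h0 : pvEnc ([] : List String) = 0 := by decide
  have houter := pv_outer (sl.getD []) []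
  rw [h0] at houter
  simp only [parse_sparsify_layers, parse_sparsify_layers_alt, PySem.Set.empty, houter]
  exact (PySem.Set.ofList_eq_self_of_nodup _ (pv_nodup (sl.getD []) [] List.nodup_nil)).symm
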